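-- pv_equiv track=rewrite | github.com/AtiqulHaque/geeksforgeeks | minimize-string-value.py | minimizeSum
-- ===== SOURCE A (Python) =====
-- def minimizeSum(frequency,k):
--     maxFrequency = 0
--     maxFrequencyCh = ''
--     end = False
--     for j, v in frequency.items():
--         if(maxFrequency < v):
--             maxFrequency = v
--             maxFrequencyCh = j
--
--     if(maxFrequency == 0):
--         return frequency
--     maxFrequency = maxFrequency -1
--     k = k - 1
--
--     if(k < 0):
--         end = True
--         k = k * -1
--         frequency[maxFrequencyCh] = k
--     elif(k == 0):
--         end = True
--         frequency[maxFrequencyCh] = maxFrequency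
--     else:
--         frequency[maxFrequencyCh] = maxFrequency
--
--     if(end):
--         return frequency;
--     else:
--         return minimizeSum(frequency,k)
-- ===== SOURCE B (Python) =====
-- def minimizeSum(frequency, k):
--     # Water-filling: instead of decrementing the running maximum one unit at a
--     # time (A is O(k*n)), compute the final level L by binary search and rebuild
--     # the dict in one pass; ties at the final level break by insertion order,
--     # exactly as A's first-maximum scan does.
--     if k <= 0:
--         return frequency
--     vals = list(frequency.values())
--     surplus = sum(v for v in vals if v > 0)
--     budget = min(k, surplus)
--
--     def S(L):
--         return sum(v - L for v in vals if v > L)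
--
--     lo = 0
--     hi = max(vals) if vals else 0
--     while lo < hi:
--         mid = (lo + hi) // 2
--         if S(mid) <= budget:
--             hi = mid
--         else:
--             lo = mid + 1
--     L = lo
--     rem = budget - S(L)
--     out = {}
--     for c, v in frequency.items():
--         if v >= L:
--             nv = L
--             if rem > 0:
--                 nv -= 1
--                 rem -= 1
--             out[c] = nv
--         else:
--             out[c] = v
--     return out
-- ===== Notes on version B (the rewrite author's own statement) =====
-- stated objective: faster
-- what changed: A repeatedly rescans the dict to decrement the current maximum one unit per recursive call; B computes the final water-filling level by binary search on the levelling cost and rebuilds the dict in a single pass, breaking ties at the final level by insertion order exactly as A's first-maximum scan does.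
-- intended difference: For k <= 0 with some positive count (and the maximum not already equal to 1-k), A still performs one step and overwrites the first maximal key with 1-k (leftover loop-state arithmetic), while B returns the dict unchanged, which is what a budget of k <= 0 decrements intends. — e.g. on minimizeSum([("a", 3), ("b", 1)], 0): A returns [("a", 1), ("b", 1)], B returns [("a", 3), ("b", 1)]
import Mathlib
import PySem

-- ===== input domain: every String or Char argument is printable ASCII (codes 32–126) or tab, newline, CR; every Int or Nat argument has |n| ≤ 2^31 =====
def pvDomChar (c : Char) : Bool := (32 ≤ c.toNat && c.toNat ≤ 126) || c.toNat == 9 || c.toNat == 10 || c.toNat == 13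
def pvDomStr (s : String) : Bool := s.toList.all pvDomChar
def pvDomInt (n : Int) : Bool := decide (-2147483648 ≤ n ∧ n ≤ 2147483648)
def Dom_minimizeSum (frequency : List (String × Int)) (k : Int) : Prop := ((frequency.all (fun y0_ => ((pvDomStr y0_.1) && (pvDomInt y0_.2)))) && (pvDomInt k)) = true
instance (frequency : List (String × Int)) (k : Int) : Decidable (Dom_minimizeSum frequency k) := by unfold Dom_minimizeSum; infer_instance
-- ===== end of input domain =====

-- B replaces A's one-decrement-at-a-time recursion by a water-filling level found
-- by binary search plus a single rebuild pass (return-value equivalence; Python A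
-- mutates the dict in place, B builds a fresh dict).

-- ===== PORT A =====
def minimizeSum (frequency : List (String × Int)) (k : Int) : List (String × Int) :=
  let m := frequency.foldl
    (fun (acc : Int × String) jv => if acc.1 < jv.2 then (jv.2, jv.1) else acc) (0, "")
  if m.1 = 0 then frequency
  else
    let mf := m.1 - 1
    let k' := k - 1
    if k' < 0 then ((PySem.Dict.mk frequency).insert m.2 (k' * -1)).items
    else if k' = 0 then ((PySem.Dict.mk frequency).insert m.2 mf).items
    else minimizeSum ((PySem.Dict.mk frequency).insert m.2 mf).items k'
termination_by k.toNat
decreasing_by omega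

-- ===== PORT B =====
-- sum(v for v in vals if v > 0)
def pvSurplus (vals : List Int) : Int :=
  vals.foldl (fun s v => if 0 < v then s + v else s) 0
-- S(L) = sum(v - L for v in vals if v > L)
def pvS (vals : List Int) (L : Int) : Int :=
  vals.foldl (fun s v => if L < v then s + (v - L) else s) 0
-- the binary-search while-loop of Source B
def pvFindL (vals : List Int) (budget lo hi : Int) : Int :=
  if lo < hi then
    let mid := PySem.Int.floordiv (lo + hi) 2
    if pvS vals mid ≤ budget then pvFindL vals budget lo mid
    else pvFindL vals budget (mid + 1) hi
  else lo
termination_by (hi - lo).toNat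
decreasing_by
  · have h := (PySem.Int.floordiv_lt_iff_lt_mul (a := lo + hi) (b := 2) (q := hi) (by omega)).mpr (by omega)
    omega
  · have h := (PySem.Int.le_floordiv_iff_mul_le (a := lo + hi) (b := 2) (q := lo) (by omega)).mpr (by omega)
    omega

def minimizeSum_alt (frequency : List (String × Int)) (k : Int) : List (String × Int) :=
  if k ≤ 0 then frequency
  else
    let vals := frequency.map (fun p => p.2)
    let surplus := pvSurplus vals
    let budget := min k surplus
    let hi := match PySem.List.max? vals (fun v => v) with
              | some m => m
              | none => 0
    let L := pvFindL vals budget 0 hi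
    let rem := budget - pvS vals L
    (frequency.foldl
      (fun (st : PySem.Dict String Int × Int) cv =>
        if L ≤ cv.2 then
          if 0 < st.2 then (st.1.insert cv.1 (L - 1), st.2 - 1)
          else (st.1.insert cv.1 L, st.2)
        else (st.1.insert cv.1 cv.2, st.2))
      (PySem.Dict.empty, rem)).1.items

-- ===== PRECONDITION & SPEC =====
-- max(0, max of the stored counts) — used by D_ below
def maxPos (f : List (String × Int)) : Int := f.foldl (fun a p => max a p.2) 0

-- Pre_ excludes association lists with duplicate keys: the argument is a Python
-- dict, whose keys are necessarily distinct, so no Python-reachable input is excluded.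
def Pre_minimizeSum (frequency : List (String × Int)) (k : Int) : Prop :=
  (frequency.map Prod.fst).Nodup
instance (frequency : List (String × Int)) (k : Int) : Decidable (Pre_minimizeSum frequency k) := by
  unfold Pre_minimizeSum; infer_instance

def pvWitness_minimizeSum : (List (String × Int)) × Int := ([("a", 2)], 1)

-- When k ≤ 0 but some count is positive, A still performs one step and overwrites the
-- first maximal key with 1 - k (leftover loop-state arithmetic), while B returns the
-- dict unchanged, which is what a budget of k ≤ 0 decrements intends; inputs where the
-- maximum already equals 1 - k (A's overwrite is invisible) are not in D_.
def D_minimizeSum (frequency : List (String × Int)) (k : Int) : Prop :=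
  k ≤ 0 ∧ 0 < maxPos frequency ∧ maxPos frequency ≠ 1 - k
instance (frequency : List (String × Int)) (k : Int) : Decidable (D_minimizeSum frequency k) := by
  unfold D_minimizeSum; infer_instance

def Spec_minimizeSum (frequency : List (String × Int)) (k : Int) (out : List (String × Int)) : Prop :=
  ¬ D_minimizeSum frequency k → out = minimizeSum_alt frequency k
instance (frequency : List (String × Int)) (k : Int) (out : List (String × Int)) : Decidable (Spec_minimizeSum frequency k out) := by
  unfold Spec_minimizeSum; infer_instance

def pvDiffWitness_minimizeSum : (List (String × Int)) × Int := ([("a", 3), ("b", 1)], 0)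
def pvDiffWitnessOut_minimizeSum : (List (String × Int)) × (List (String × Int)) :=
  ([("a", 1), ("b", 1)], [("a", 3), ("b", 1)])

-- ===== CLAIM (what is proved, stated in full; the proofs are below) =====
def Claim_unchanged_minimizeSum : Prop := ∀ (frequency : List (String × Int)) (k : Int), Dom_minimizeSum frequency k → Pre_minimizeSum frequency k → Spec_minimizeSum frequency k (minimizeSum frequency k)
def Claim_changed_minimizeSum : Prop := Dom_minimizeSum (pvDiffWitness_minimizeSum.1) (pvDiffWitness_minimizeSum.2) ∧ Pre_minimizeSum (pvDiffWitness_minimizeSum.1) (pvDiffWitness_minimizeSum.2) ∧ D_minimizeSum (pvDiffWitness_minimizeSum.1) (pvDiffWitness_minimizeSum.2) ∧ minimizeSum (pvDiffWitness_minimizeSum.1) (pvDiffWitness_minimizeSum.2) = pvDiffWitnessOut_minimizeSum.1 ∧ minimizeSum_alt (pvDiffWitness_minimizeSum.1) (pvDiffWitness_minimizeSum.2) = pvDiffWitnessOut_minimizeSum.2 ∧ pvDiffWitnessOut_minimizeSum.1 ≠ pvDiffWitnessOut_minimizeSum.2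
def Claim_exact_minimizeSum : Prop := ∀ (frequency : List (String × Int)) (k : Int), Dom_minimizeSum frequency k → Pre_minimizeSum frequency k → D_minimizeSum frequency k → minimizeSum frequency k ≠ minimizeSum_alt frequency k

-- ===== LEMMAS AND PROOFS =====

-- the cost of levelling everything down to L
def pvSC (vals : List Int) (L : Int) : Int := (vals.map (fun v => max (v - L) 0)).sum

-- the clean recursion behind B's rebuild fold
def pvRebuild (L : Int) : List (String × Int) → Int → List (String × Int)
  | [], _ => []
  | (c, v) :: t, r =>
    if L ≤ v then
      if 0 < r then (c, L - 1) :: pvRebuild L t (r - 1) else (c, L) :: pvRebuild L t r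
    else (c, v) :: pvRebuild L t r

-- "L is THE water level for budget b": feasible and minimal among nonnegatives
def pvIsLevel (vals : List Int) (b L : Int) : Prop :=
  0 ≤ L ∧ pvSC vals L ≤ b ∧ ∀ x, 0 ≤ x → x < L → b < pvSC vals x

theorem pvS_aux (L : Int) (vals : List Int) :
    ∀ s : Int, vals.foldl (fun s v => if L < v then s + (v - L) else s) s = s + pvSC vals L := by
  induction vals with
  | nil => intro s; simp [pvSC]
  | cons v t ih =>
    intro s
    simp only [List.foldl_cons, pvSC, List.map_cons, List.sum_cons] at *
    split_ifs with h
    · rw [ih]; simp only [pvSC] at *; omega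
    · rw [ih]; simp only [pvSC] at *; omega

theorem pvS_eq (vals : List Int) (L : Int) : pvS vals L = pvSC vals L := by
  have := pvS_aux L vals 0
  simpa [pvS] using this

theorem pvSurplus_aux (vals : List Int) :
    ∀ s : Int, vals.foldl (fun s v => if 0 < v then s + v else s) s = s + pvSC vals 0 := by
  induction vals with
  | nil => intro s; simp [pvSC]
  | cons v t ih =>
    intro s
    simp only [List.foldl_cons, pvSC, List.map_cons, List.sum_cons] at *
    split_ifs with h
    · rw [ih]; simp only [pvSC] at *; omega
    · rw [ih]; simp only [pvSC] at *; omega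

theorem pvSurplus_eq (vals : List Int) : pvSurplus vals = pvSC vals 0 := by
  have := pvSurplus_aux vals 0
  simpa [pvSurplus] using this

theorem pvSC_nonneg (vals : List Int) (L : Int) : 0 ≤ pvSC vals L := by
  unfold pvSC
  apply List.sum_nonneg
  intro x hx
  simp only [List.mem_map] at hx
  obtain ⟨v, _, rfl⟩ := hx
  omega

theorem pvSC_eq_zero_of_le (vals : List Int) (L : Int) (h : ∀ v ∈ vals, v ≤ L) :
    pvSC vals L = 0 := by
  induction vals with
  | nil => simp [pvSC]
  | cons v t ih =>
    have hv := h v (by simp)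
    have ht := ih (fun v hv => h v (by simp [hv]))
    simp only [pvSC, List.map_cons, List.sum_cons] at *
    omega

theorem pvSC_append (a b : List Int) (L : Int) :
    pvSC (a ++ b) L = pvSC a L + pvSC b L := by
  simp [pvSC]

theorem pvSC_cons (v : Int) (t : List Int) (L : Int) :
    pvSC (v :: t) L = max (v - L) 0 + pvSC t L := by
  simp [pvSC]

theorem pvSC_antitone (vals : List Int) {L L' : Int} (h : L ≤ L') :
    pvSC vals L' ≤ pvSC vals L := by
  induction vals with
  | nil => simp [pvSC]
  | cons v t ih =>
    simp only [pvSC, List.map_cons, List.sum_cons] at *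
    omega

theorem pvSC_ge_of_mem (vals : List Int) (v : Int) (hv : v ∈ vals) :
    max (v - 0) 0 ≤ pvSC vals 0 := by
  unfold pvSC
  apply List.single_le_sum
  · intro x hx
    simp only [List.mem_map] at hx
    obtain ⟨w, _, rfl⟩ := hx
    omega
  · exact List.mem_map.mpr ⟨v, hv, rfl⟩

theorem pvSC_le_of_eq_zero (vals : List Int) (L : Int) (h : pvSC vals L = 0) :
    ∀ v ∈ vals, v ≤ L := by
  induction vals with
  | nil => simp
  | cons v t ih =>
    have hnn := pvSC_nonneg t L
    rw [pvSC_cons] at h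
    intro w hw
    rcases List.mem_cons.mp hw with rfl | hw
    · omega
    · exact ih (by omega) w hw

theorem pvIsLevel_unique (vals : List Int) (b L1 L2 : Int)
    (h1 : pvIsLevel vals b L1) (h2 : pvIsLevel vals b L2) : L1 = L2 := by
  obtain ⟨h10, h1f, h1m⟩ := h1
  obtain ⟨h20, h2f, h2m⟩ := h2
  rcases lt_trichotomy L1 L2 with h | h | h
  · have := h2m L1 h10 h; omega
  · exact h
  · have := h1m L2 h20 h; omega

theorem pvFindL_spec_aux (vals : List Int) (b : Int) :
    ∀ (n : Nat) (lo hi : Int), (hi - lo).toNat ≤ n → lo ≤ hi → pvSC vals hi ≤ b →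
      lo ≤ pvFindL vals b lo hi ∧ pvFindL vals b lo hi ≤ hi ∧
      pvSC vals (pvFindL vals b lo hi) ≤ b ∧
      ∀ x, lo ≤ x → x < pvFindL vals b lo hi → b < pvSC vals x := by
  intro n
  induction n with
  | zero =>
    intro lo hi hn hle hfeas
    have heq : lo = hi := by omega
    rw [pvFindL]
    simp only [heq, lt_irrefl, if_false]
    subst heq
    refine ⟨le_refl _, le_refl _, hfeas, fun x h1 h2 => by omega⟩
  | succ n ih =>
    intro lo hi hn hle hfeas
    rw [pvFindL]
    by_cases hlt : lo < hi
    · simp only [hlt, if_true]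
      have hmid := PySem.Int.floordiv_two_mid_bounds (le_of_lt hlt)
      have hmidlt : PySem.Int.floordiv (lo + hi) 2 < hi :=
        (PySem.Int.floordiv_lt_iff_lt_mul (by omega)).mpr (by omega)
      set mid := PySem.Int.floordiv (lo + hi) 2 with hmiddef
      by_cases hS : pvS vals mid ≤ b
      · simp only [hS, if_true]
        rw [pvS_eq] at hS
        have := ih lo mid (by omega) (by omega) hS
        refine ⟨this.1, by omega, this.2.2.1, this.2.2.2⟩
      · simp only [hS, if_false]
        rw [pvS_eq] at hS
        push_neg at hS
        have := ih (mid + 1) hi (by omega) (by omega) hfeas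
        refine ⟨by omega, this.2.1, this.2.2.1, ?_⟩
        intro x hx1 hx2
        by_cases hxm : mid + 1 ≤ x
        · exact this.2.2.2 x hxm hx2
        · calc b < pvSC vals mid := hS
            _ ≤ pvSC vals x := pvSC_antitone vals (by omega)
    · simp only [hlt, if_false]
      have heq : lo = hi := by omega
      subst heq
      refine ⟨le_refl _, le_refl _, hfeas, fun x h1 h2 => by omega⟩

theorem pvFindL_spec (vals : List Int) (b : Int) :
    ∀ lo hi : Int, lo ≤ hi → pvSC vals hi ≤ b →
      lo ≤ pvFindL vals b lo hi ∧ pvFindL vals b lo hi ≤ hi ∧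
      pvSC vals (pvFindL vals b lo hi) ≤ b ∧
      ∀ x, lo ≤ x → x < pvFindL vals b lo hi → b < pvSC vals x := by
  intro lo hi hle hfeas
  exact pvFindL_spec_aux vals b (hi - lo).toNat lo hi (le_refl _) hle hfeas

-- the L computed by B is the water level (for B's hi = max(vals, default 0))
theorem pvSC_max_eq_zero (vals : List Int) :
    pvSC vals (match PySem.List.max? vals (fun v => v) with | some m => m | none => 0) = 0 := by
  cases hm : PySem.List.max? vals (fun v => v) with
  | none =>
    have : vals = [] := (PySem.List.max?_eq_none_iff vals (fun v => v)).mp hm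
    subst this; simp [pvSC]
  | some m =>
    exact pvSC_eq_zero_of_le vals m (fun v hv => PySem.List.max?_isMax hm v hv)

theorem pvIsLevel_findL (vals : List Int) (b : Int) (hb : 0 ≤ b) :
    pvIsLevel vals b (pvFindL vals b 0
      (match PySem.List.max? vals (fun v => v) with | some m => m | none => 0)) := by
  set hi := (match PySem.List.max? vals (fun v => v) with | some m => m | none => 0) with hhi
  have hzero : pvSC vals hi = 0 := pvSC_max_eq_zero vals
  by_cases hcase : 0 ≤ hi
  · have h := pvFindL_spec vals b 0 hi hcase (by omega)
    exact ⟨h.1, h.2.2.1, fun x hx1 hx2 => h.2.2.2 x hx1 hx2⟩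
  · rw [pvFindL]
    simp only [show ¬ (0 < hi) by omega, if_false]
    have : pvSC vals 0 ≤ pvSC vals hi := pvSC_antitone vals (by omega)
    exact ⟨le_refl _, by omega, fun x hx1 hx2 => by omega⟩

theorem pvIsLevel_exists (vals : List Int) (b : Int) (hb : 0 ≤ b) :
    ∃ L, pvIsLevel vals b L :=
  ⟨_, pvIsLevel_findL vals b hb⟩

-- B's Dict-building fold is pvRebuild when keys are distinct
theorem pvFold_rebuild (L : Int) :
    ∀ (f : List (String × Int)) (d : PySem.Dict String Int) (r : Int),
      (∀ p ∈ f, d.contains p.1 = false) → (f.map Prod.fst).Nodup →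
      ((f.foldl
        (fun (st : PySem.Dict String Int × Int) cv =>
          if L ≤ cv.2 then
            if 0 < st.2 then (st.1.insert cv.1 (L - 1), st.2 - 1)
            else (st.1.insert cv.1 L, st.2)
          else (st.1.insert cv.1 cv.2, st.2)) (d, r)).1).items
        = d.items ++ pvRebuild L f r := by
  intro f
  induction f with
  | nil => intro d r _ _; simp [pvRebuild]
  | cons cv t ih =>
    intro d r hfresh hnd
    obtain ⟨c, v⟩ := cv
    have hc : d.contains c = false := hfresh (c, v) (by simp)
    have hnd' : (t.map Prod.fst).Nodup := by
      simp only [List.map_cons, List.nodup_cons] at hnd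
      exact hnd.2
    have hcnotin : c ∉ t.map Prod.fst := by
      simp only [List.map_cons, List.nodup_cons] at hnd
      exact hnd.1
    have hfresh' : ∀ (w : Int) (p : String × Int), p ∈ t → (d.insert c w).contains p.1 = false := by
      intro w p hp
      rw [PySem.Dict.contains_insert]
      have hne : p.1 ≠ c := by
        intro h
        exact hcnotin (List.mem_map.mpr ⟨p, hp, h⟩)
      simp [hne, hfresh p (by simp [hp])]
    have hitems : ∀ w : Int, (d.insert c w).items = d.items ++ [(c, w)] :=
      fun w => PySem.Dict.items_insert_of_not_contains d w hc
    simp only [List.foldl_cons, pvRebuild]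
    split_ifs with h1 h2
    · rw [ih (d.insert c (L - 1)) (r - 1) (fun p hp => hfresh' (L - 1) p hp) hnd',
        hitems, List.append_assoc]
      rfl
    · rw [ih (d.insert c L) r (fun p hp => hfresh' L p hp) hnd', hitems, List.append_assoc]
      rfl
    · rw [ih (d.insert c v) r (fun p hp => hfresh' v p hp) hnd', hitems, List.append_assoc]
      rfl

theorem pvRebuild_id (L : Int) (f : List (String × Int)) (h : ∀ p ∈ f, p.2 ≤ L) :
    pvRebuild L f 0 = f := by
  induction f with
  | nil => simp [pvRebuild]
  | cons cv t ih =>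
    obtain ⟨c, v⟩ := cv
    have hv : v ≤ L := h (c, v) (by simp)
    have ht := ih (fun p hp => h p (by simp [hp]))
    simp only [pvRebuild]
    split_ifs with h1 h2
    · omega
    · rw [ht]
      simp [show L = v by omega]
    · simp [ht]

theorem pvRebuild_step_lt (ch : String) (M L : Int) (p t : List (String × Int)) (r : Int)
    (hL : L ≤ M - 1) :
    pvRebuild L (p ++ (ch, M) :: t) r = pvRebuild L (p ++ (ch, M - 1) :: t) r := by
  induction p generalizing r with
  | nil =>
    simp only [List.nil_append, pvRebuild]
    split_ifs with h1 h2 h3 <;> simp_all <;> omega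
  | cons q p' ih =>
    obtain ⟨c, v⟩ := q
    simp only [List.cons_append, pvRebuild]
    split_ifs with h1 h2
    · rw [ih (r - 1)]
    · rw [ih r]
    · rw [ih r]

theorem pvRebuild_step_eq (ch : String) (M : Int) (p t : List (String × Int)) (r : Int)
    (hp : ∀ q ∈ p, q.2 < M) (hr : 0 < r) :
    pvRebuild M (p ++ (ch, M) :: t) r = pvRebuild M (p ++ (ch, M - 1) :: t) (r - 1) := by
  induction p generalizing r with
  | nil =>
    simp only [List.nil_append, pvRebuild]
    split_ifs with h1 h2 h3 <;> simp_all <;> omega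
  | cons q p' ih =>
    obtain ⟨c, v⟩ := q
    have hv : v < M := hp (c, v) (by simp)
    have hp' : ∀ q ∈ p', q.2 < M := fun q hq => hp q (by simp [hq])
    have h1 : ¬ (M ≤ v) := by omega
    simp only [List.cons_append, pvRebuild, if_neg h1]
    rw [ih r hp' hr]

theorem pvSC_dec (vp vt : List Int) (M x : Int) :
    pvSC (vp ++ (M - 1) :: vt) x = pvSC (vp ++ M :: vt) x - (if x < M then 1 else 0) := by
  rw [pvSC_append, pvSC_append, pvSC_cons, pvSC_cons]
  split_ifs with h <;> omega

-- the combined one-decrement step of the water level picture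
theorem pvStep_core (ch : String) (M b : Int) (p t : List (String × Int))
    (hp : ∀ q ∈ p, q.2 < M) (hM : 0 < M) (hb : 1 ≤ b)
    (hmax : ∀ q ∈ p ++ (ch, M) :: t, q.2 ≤ M)
    (L L' : Int)
    (h1 : pvIsLevel ((p ++ (ch, M) :: t).map (fun q => q.2)) b L)
    (h2 : pvIsLevel ((p ++ (ch, M - 1) :: t).map (fun q => q.2)) (b - 1) L') :
    pvRebuild L (p ++ (ch, M) :: t) (b - pvSC ((p ++ (ch, M) :: t).map (fun q => q.2)) L)
      = pvRebuild L' (p ++ (ch, M - 1) :: t)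
          ((b - 1) - pvSC ((p ++ (ch, M - 1) :: t).map (fun q => q.2)) L') := by
  have hvals : (p ++ (ch, M) :: t).map (fun q => q.2)
      = p.map (fun q => q.2) ++ M :: t.map (fun q => q.2) := by simp
  have hvals' : (p ++ (ch, M - 1) :: t).map (fun q => q.2)
      = p.map (fun q => q.2) ++ (M - 1) :: t.map (fun q => q.2) := by simp
  have hSdec : ∀ x, pvSC ((p ++ (ch, M - 1) :: t).map (fun q => q.2)) x
      = pvSC ((p ++ (ch, M) :: t).map (fun q => q.2)) x - (if x < M then 1 else 0) := by
    intro x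
    rw [hvals, hvals', pvSC_dec]
  have hallle : ∀ v ∈ (p ++ (ch, M) :: t).map (fun q => q.2), v ≤ M := by
    intro v hv
    obtain ⟨q, hq, rfl⟩ := List.mem_map.mp hv
    exact hmax q hq
  have hSM : pvSC ((p ++ (ch, M) :: t).map (fun q => q.2)) M = 0 :=
    pvSC_eq_zero_of_le _ _ hallle
  obtain ⟨hL0, hLf, hLmin⟩ := h1
  have hLM : L ≤ M := by
    by_contra hcon
    have := hLmin M (by omega) (by omega)
    omega
  have hlev' : pvIsLevel ((p ++ (ch, M - 1) :: t).map (fun q => q.2)) (b - 1) L := by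
    refine ⟨hL0, ?_, ?_⟩
    · by_cases hc : L < M
      · rw [hSdec L, if_pos hc]; omega
      · have hLM2 : L = M := by omega
        rw [hSdec L, if_neg hc, hLM2, hSM]; omega
    · intro x hx0 hxL
      have hbx := hLmin x hx0 hxL
      by_cases hc : x < M
      · rw [hSdec x, if_pos hc]; omega
      · have ha := pvSC_antitone ((p ++ (ch, M) :: t).map (fun q => q.2)) (show M ≤ x by omega)
        rw [hSM] at ha
        have hnn := pvSC_nonneg ((p ++ (ch, M) :: t).map (fun q => q.2)) x
        omega
  have hLL' : L' = L :=
    pvIsLevel_unique ((p ++ (ch, M - 1) :: t).map (fun q => q.2)) (b - 1) L' L h2 hlev'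
  rw [hLL']
  by_cases hc : L ≤ M - 1
  · have hr : (b - 1) - pvSC ((p ++ (ch, M - 1) :: t).map (fun q => q.2)) L
        = b - pvSC ((p ++ (ch, M) :: t).map (fun q => q.2)) L := by
      rw [hSdec L, if_pos (by omega)]; ring
    rw [hr]
    exact pvRebuild_step_lt ch M L p t _ hc
  · have hLM2 : L = M := by omega
    have hS'M : pvSC ((p ++ (ch, M - 1) :: t).map (fun q => q.2)) M = 0 := by
      rw [hSdec M, if_neg (by omega), hSM]; omega
    rw [hLM2, hSM, hS'M, sub_zero, sub_zero]
    exact pvRebuild_step_eq ch M p t b hp (by omega)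

-- A's running-max pair fold: first component
theorem pvMaxfold_fst (f : List (String × Int)) :
    ∀ (a : Int) (c : String),
      (f.foldl (fun (acc : Int × String) jv =>
        if acc.1 < jv.2 then (jv.2, jv.1) else acc) (a, c)).1
        = f.foldl (fun x p => max x p.2) a := by
  induction f with
  | nil => intro a c; rfl
  | cons q t ih =>
    intro a c
    obtain ⟨c0, v0⟩ := q
    simp only [List.foldl_cons]
    by_cases h : a < v0
    · rw [if_pos h, ih]
      congr 1
      omega
    · rw [if_neg h, ih]
      congr 1
      omega

-- A's running-max pair fold: full characterisation (first maximal element)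
theorem pvMaxfold (f : List (String × Int)) :
    ∀ (a : Int) (c : String),
      (∀ q ∈ f, q.2 ≤ (f.foldl (fun (acc : Int × String) jv =>
          if acc.1 < jv.2 then (jv.2, jv.1) else acc) (a, c)).1) ∧
      a ≤ (f.foldl (fun (acc : Int × String) jv =>
          if acc.1 < jv.2 then (jv.2, jv.1) else acc) (a, c)).1 ∧
      (((f.foldl (fun (acc : Int × String) jv =>
          if acc.1 < jv.2 then (jv.2, jv.1) else acc) (a, c)) = (a, c)) ∨
        (a < (f.foldl (fun (acc : Int × String) jv =>
          if acc.1 < jv.2 then (jv.2, jv.1) else acc) (a, c)).1 ∧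
         ∃ p t, f = p ++ ((f.foldl (fun (acc : Int × String) jv =>
            if acc.1 < jv.2 then (jv.2, jv.1) else acc) (a, c)).2,
            (f.foldl (fun (acc : Int × String) jv =>
            if acc.1 < jv.2 then (jv.2, jv.1) else acc) (a, c)).1) :: t ∧
           ∀ q ∈ p, q.2 < (f.foldl (fun (acc : Int × String) jv =>
            if acc.1 < jv.2 then (jv.2, jv.1) else acc) (a, c)).1)) := by
  induction f with
  | nil =>
    intro a c
    exact ⟨by simp, le_refl a, Or.inl rfl⟩
  | cons q t ih =>
    intro a c
    obtain ⟨c0, v0⟩ := q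
    simp only [List.foldl_cons]
    by_cases h : a < v0
    · rw [if_pos h]
      obtain ⟨hall, hacc, hdisj⟩ := ih v0 c0
      refine ⟨?_, by omega, ?_⟩
      · intro q hq
        rcases List.mem_cons.mp hq with rfl | hq
        · exact hacc
        · exact hall q hq
      · rcases hdisj with heq | ⟨hlt, p, t', hsplit, hpre⟩
        · right
          refine ⟨by simpa [heq] using h, [], t, ?_, by simp⟩
          rw [heq]
          rfl
        · right
          refine ⟨by omega, (c0, v0) :: p, t', by rw [List.cons_append, ← hsplit], ?_⟩
          intro q hq
          rcases List.mem_cons.mp hq with rfl | hq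
          · omega
          · exact hpre q hq
    · rw [if_neg h]
      obtain ⟨hall, hacc, hdisj⟩ := ih a c
      refine ⟨?_, hacc, ?_⟩
      · intro q hq
        rcases List.mem_cons.mp hq with rfl | hq
        · omega
        · exact hall q hq
      · rcases hdisj with heq | ⟨hlt, p, t', hsplit, hpre⟩
        · left; exact heq
        · right
          refine ⟨hlt, (c0, v0) :: p, t', by rw [List.cons_append, ← hsplit], ?_⟩
          intro q hq
          rcases List.mem_cons.mp hq with rfl | hq
          · omega
          · exact hpre q hq

theorem pvInsert_split (p t : List (String × Int)) (ch : String) (v w : Int)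
    (hnd : ((p ++ (ch, w) :: t).map Prod.fst).Nodup) :
    ((PySem.Dict.mk (p ++ (ch, w) :: t)).insert ch v).items = p ++ (ch, v) :: t := by
  have hmem : ch ∈ (p ++ (ch, w) :: t).map Prod.fst := by simp
  have hcont : (PySem.Dict.mk (p ++ (ch, w) :: t)).contains ch = true := by
    simp [PySem.Dict.contains_mk]
  rw [PySem.Dict.items_insert_of_contains _ v hcont]
  have hitems : (PySem.Dict.mk (p ++ (ch, w) :: t)).items = p ++ (ch, w) :: t := rfl
  rw [hitems]
  rw [List.map_append, List.map_cons]
  simp only [List.map_append] at hnd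
  have hchp : ch ∉ p.map Prod.fst := by
    intro hin
    rw [List.map_cons] at hnd
    have := List.disjoint_of_nodup_append hnd
    exact this hin (by simp)
  have hcht : ch ∉ t.map Prod.fst := by
    rw [List.map_cons] at hnd
    have := (List.nodup_append.mp hnd).2.1
    simp only [List.nodup_cons] at this
    exact this.1
  congr 1
  · have hcong : ∀ q ∈ p, (if (q.1 == ch) = true then (ch, v) else q) = id q := by
      intro q hq
      have : q.1 ≠ ch := fun h => hchp (List.mem_map.mpr ⟨q, hq, h⟩)
      simp [this]
    rw [List.map_congr_left hcong, List.map_id]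
  · simp only [beq_self_eq_true, if_true, List.cons.injEq, true_and]
    have hcong : ∀ q ∈ t, (if (q.1 == ch) = true then (ch, v) else q) = id q := by
      intro q hq
      have : q.1 ≠ ch := fun h => hcht (List.mem_map.mpr ⟨q, hq, h⟩)
      simp [this]
    rw [List.map_congr_left hcong, List.map_id]

theorem pvMaxPos_nonneg (f : List (String × Int)) : 0 ≤ maxPos f :=
  (PySem.List.le_foldl_max_int f (fun p => p.2) 0).1

-- unfold lemmas for A's three exits
theorem pvA_max0 (f : List (String × Int)) (k : Int)
    (h : (f.foldl (fun (acc : Int × String) jv => if acc.1 < jv.2 then (jv.2, jv.1) else acc) (0, "")).1 = 0) :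
    minimizeSum f k = f := by
  rw [minimizeSum]
  simp only [h]
  rw [if_pos trivial]

theorem pvA_base (f : List (String × Int)) (k : Int)
    (h : (f.foldl (fun (acc : Int × String) jv => if acc.1 < jv.2 then (jv.2, jv.1) else acc) (0, "")).1 ≠ 0)
    (hk : k = 1) :
    minimizeSum f k = ((PySem.Dict.mk f).insert
      (f.foldl (fun (acc : Int × String) jv => if acc.1 < jv.2 then (jv.2, jv.1) else acc) (0, "")).2
      ((f.foldl (fun (acc : Int × String) jv => if acc.1 < jv.2 then (jv.2, jv.1) else acc) (0, "")).1 - 1)).items := by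
  rw [minimizeSum]
  rw [if_neg (by simpa using h)]
  rw [if_neg (by omega), if_pos (by omega)]

theorem pvA_step (f : List (String × Int)) (k : Int)
    (h : (f.foldl (fun (acc : Int × String) jv => if acc.1 < jv.2 then (jv.2, jv.1) else acc) (0, "")).1 ≠ 0)
    (hk : 2 ≤ k) :
    minimizeSum f k = minimizeSum ((PySem.Dict.mk f).insert
      (f.foldl (fun (acc : Int × String) jv => if acc.1 < jv.2 then (jv.2, jv.1) else acc) (0, "")).2
      ((f.foldl (fun (acc : Int × String) jv => if acc.1 < jv.2 then (jv.2, jv.1) else acc) (0, "")).1 - 1)).items (k - 1) := by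
  rw [minimizeSum]
  rw [if_neg (by simpa using h)]
  rw [if_neg (by omega), if_neg (by omega)]

theorem pvA_neg (f : List (String × Int)) (k : Int)
    (h : (f.foldl (fun (acc : Int × String) jv => if acc.1 < jv.2 then (jv.2, jv.1) else acc) (0, "")).1 ≠ 0)
    (hk : k ≤ 0) :
    minimizeSum f k = ((PySem.Dict.mk f).insert
      (f.foldl (fun (acc : Int × String) jv => if acc.1 < jv.2 then (jv.2, jv.1) else acc) (0, "")).2
      ((k - 1) * -1)).items := by
  rw [minimizeSum]
  rw [if_neg (by simpa using h)]
  rw [if_pos (by omega)]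

-- main induction: A computed by water filling, for k ≥ 1
theorem pvMain (n : Nat) :
    ∀ (f : List (String × Int)) (k : Int), k.toNat ≤ n →
      (f.map Prod.fst).Nodup → 1 ≤ k →
      ∀ L, pvIsLevel (f.map (fun q => q.2)) (min k (pvSC (f.map (fun q => q.2)) 0)) L →
        minimizeSum f k
          = pvRebuild L f (min k (pvSC (f.map (fun q => q.2)) 0)
              - pvSC (f.map (fun q => q.2)) L) := by
  induction n with
  | zero => intro f k hkn _ hk1 L _; omega
  | succ n ih =>
    intro f k hkn hnd hk1 L hlev
    by_cases h0 : (f.foldl (fun (acc : Int × String) jv =>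
        if acc.1 < jv.2 then (jv.2, jv.1) else acc) (0, "")).1 = 0
    · rw [pvA_max0 f k h0]
      obtain ⟨hall, hacc, _⟩ := pvMaxfold f 0 ""
      rw [pvMaxfold_fst] at hall
      have hle0 : ∀ v ∈ f.map (fun q => q.2), v ≤ (0 : Int) := by
        intro v hv
        obtain ⟨q, hq, rfl⟩ := List.mem_map.mp hv
        have h1 := hall q hq
        rw [← pvMaxfold_fst f 0 ""] at h1
        omega
      have hSC0 : pvSC (f.map (fun q => q.2)) 0 = 0 := pvSC_eq_zero_of_le _ _ hle0
      rw [hSC0] at hlev ⊢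
      have hb : min k (0 : Int) = 0 := by omega
      rw [hb] at hlev ⊢
      obtain ⟨hL0, hLf, _⟩ := hlev
      have hSCL : pvSC (f.map (fun q => q.2)) L = 0 :=
        le_antisymm hLf (pvSC_nonneg _ _)
      rw [hSCL, show (0 : Int) - 0 = 0 by omega]
      symm
      apply pvRebuild_id
      intro q hq
      exact pvSC_le_of_eq_zero _ _ hSCL q.2 (List.mem_map.mpr ⟨q, hq, rfl⟩)
    · obtain ⟨hall, hacc, hdisj⟩ := pvMaxfold f 0 ""
      rcases hdisj with heq | ⟨hpos, p, t, hsplit, hpre⟩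
      · exact absurd (by rw [heq]) h0
      set M := (f.foldl (fun (acc : Int × String) jv =>
          if acc.1 < jv.2 then (jv.2, jv.1) else acc) (0, "")).1 with hM
      set ch := (f.foldl (fun (acc : Int × String) jv =>
          if acc.1 < jv.2 then (jv.2, jv.1) else acc) (0, "")).2 with hch
      have hMpos : 0 < M := hpos
      have hndsplit : ((p ++ (ch, M) :: t).map Prod.fst).Nodup := by
        rw [← hsplit]; exact hnd
      have hnd' : ((p ++ (ch, M - 1) :: t).map Prod.fst).Nodup := by
        have hsame : (p ++ (ch, M - 1) :: t).map Prod.fst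
            = (p ++ (ch, M) :: t).map Prod.fst := by simp
        rw [hsame]; exact hndsplit
      have hins : ((PySem.Dict.mk f).insert ch (M - 1)).items = p ++ (ch, M - 1) :: t := by
        conv_lhs => rw [hsplit]
        exact pvInsert_split p t ch (M - 1) M hndsplit
      have hMmem : M ∈ f.map (fun q => q.2) := by rw [hsplit]; simp
      have hSC0ge : M ≤ pvSC (f.map (fun q => q.2)) 0 := by
        have := pvSC_ge_of_mem (f.map (fun q => q.2)) M hMmem
        omega
      set b := min k (pvSC (f.map (fun q => q.2)) 0) with hb
      have hb1 : 1 ≤ b := by omega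
      have hmaxsplit : ∀ q ∈ p ++ (ch, M) :: t, q.2 ≤ M := by
        rw [← hsplit]; exact hall
      have hlevsplit : pvIsLevel ((p ++ (ch, M) :: t).map (fun q => q.2)) b L := by
        rw [← hsplit]; exact hlev
      have hstep : ∀ L', pvIsLevel ((p ++ (ch, M - 1) :: t).map (fun q => q.2)) (b - 1) L' →
          pvRebuild L f (b - pvSC (f.map (fun q => q.2)) L)
            = pvRebuild L' (p ++ (ch, M - 1) :: t)
                ((b - 1) - pvSC ((p ++ (ch, M - 1) :: t).map (fun q => q.2)) L') := by
        intro L' hL'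
        conv_lhs => rw [hsplit]
        exact pvStep_core ch M b p t hpre hMpos hb1 hmaxsplit L L' hlevsplit hL'
      have hSC0' : pvSC ((p ++ (ch, M - 1) :: t).map (fun q => q.2)) 0
          = pvSC (f.map (fun q => q.2)) 0 - 1 := by
        have hv1 : (p ++ (ch, M - 1) :: t).map (fun q => q.2)
            = p.map (fun q => q.2) ++ (M - 1) :: t.map (fun q => q.2) := by simp
        have hv2 : f.map (fun q => q.2)
            = p.map (fun q => q.2) ++ M :: t.map (fun q => q.2) := by
          rw [hsplit]; simp
        rw [hv1, hv2, pvSC_dec, if_pos hMpos]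
      by_cases hk2 : k = 1
      · rw [pvA_base f k h0 hk2, ← hM, ← hch, hins]
        have hbeq : b = 1 := by omega
        obtain ⟨L', hlev'⟩ :=
          pvIsLevel_exists ((p ++ (ch, M - 1) :: t).map (fun q => q.2)) 0 (le_refl 0)
        have hlev'' : pvIsLevel ((p ++ (ch, M - 1) :: t).map (fun q => q.2)) (b - 1) L' := by
          rw [hbeq, show (1 : Int) - 1 = 0 by omega]; exact hlev'
        rw [hstep L' hlev'']
        have hSCL' : pvSC ((p ++ (ch, M - 1) :: t).map (fun q => q.2)) L' = 0 :=
          le_antisymm (by simpa [hbeq] using hlev''.2.1) (pvSC_nonneg _ _)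
        rw [hSCL', hbeq, show (1 : Int) - 1 - 0 = 0 by omega]
        symm
        apply pvRebuild_id
        intro q hq
        exact pvSC_le_of_eq_zero _ _ hSCL' q.2 (List.mem_map.mpr ⟨q, hq, rfl⟩)
      · have hk2' : 2 ≤ k := by omega
        rw [pvA_step f k h0 hk2', ← hM, ← hch, hins]
        have hb' : min (k - 1) (pvSC ((p ++ (ch, M - 1) :: t).map (fun q => q.2)) 0) = b - 1 := by
          rw [hSC0']; omega
        obtain ⟨L', hlev'⟩ :=
          pvIsLevel_exists ((p ++ (ch, M - 1) :: t).map (fun q => q.2)) (b - 1) (by omega)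
        have ihres := ih (p ++ (ch, M - 1) :: t) (k - 1) (by omega) hnd' (by omega) L'
          (by rw [hb']; exact hlev')
        rw [ihres, hb']
        exact (hstep L' hlev').symm

-- B's value rewritten through the clean rebuild recursion (k > 0, distinct keys)
theorem pvAlt_eq (f : List (String × Int)) (k : Int) (hk : ¬ k ≤ 0)
    (hnd : (f.map Prod.fst).Nodup) :
    minimizeSum_alt f k
      = pvRebuild
          (pvFindL (f.map (fun p => p.2)) (min k (pvSurplus (f.map (fun p => p.2)))) 0
            (match PySem.List.max? (f.map (fun p => p.2)) (fun v => v) with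
              | some m => m | none => 0))
          f
          (min k (pvSurplus (f.map (fun p => p.2)))
            - pvS (f.map (fun p => p.2))
                (pvFindL (f.map (fun p => p.2)) (min k (pvSurplus (f.map (fun p => p.2)))) 0
                  (match PySem.List.max? (f.map (fun p => p.2)) (fun v => v) with
                    | some m => m | none => 0))) := by
  rw [minimizeSum_alt]
  rw [if_neg hk]
  rw [pvFold_rebuild _ f PySem.Dict.empty _ (fun p _ => PySem.Dict.contains_empty p.1) hnd]
  show PySem.Dict.empty.items ++ _ = _
  rw [show PySem.Dict.empty.items = ([] : List (String × Int)) from rfl, List.nil_append]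

-- ===== VERDICT (by name: the statement is the Claim_ definition above) =====
theorem minimizeSum_spec : Claim_unchanged_minimizeSum := by
  intro f k _ hpre
  unfold Spec_minimizeSum
  intro hnD
  by_cases hk : k ≤ 0
  · have halt : minimizeSum_alt f k = f := by
      rw [minimizeSum_alt, if_pos hk]
    rw [halt]
    have hfold1 : (f.foldl (fun (acc : Int × String) jv =>
        if acc.1 < jv.2 then (jv.2, jv.1) else acc) (0, "")).1 = maxPos f := by
      rw [pvMaxfold_fst]; rfl
    by_cases hm : maxPos f ≤ 0
    · refine pvA_max0 f k ?_
      have := pvMaxPos_nonneg f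
      omega
    · have hMk : maxPos f = 1 - k := by
        by_contra hne
        exact hnD ⟨hk, by omega, hne⟩
      have h0 : (f.foldl (fun (acc : Int × String) jv =>
          if acc.1 < jv.2 then (jv.2, jv.1) else acc) (0, "")).1 ≠ 0 := by omega
      rw [pvA_neg f k h0 hk]
      obtain ⟨hall, hacc, hdisj⟩ := pvMaxfold f 0 ""
      rcases hdisj with heq | ⟨hpos, p, t, hsplit, hpre'⟩
      · exact absurd (by rw [heq]) h0
      set M := (f.foldl (fun (acc : Int × String) jv =>
          if acc.1 < jv.2 then (jv.2, jv.1) else acc) (0, "")).1 with hMdef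
      set ch := (f.foldl (fun (acc : Int × String) jv =>
          if acc.1 < jv.2 then (jv.2, jv.1) else acc) (0, "")).2 with hchdef
      have hndsplit : ((p ++ (ch, M) :: t).map Prod.fst).Nodup := by
        rw [← hsplit]; exact hpre
      have hval : (k - 1) * -1 = M := by
        have : (k - 1) * -1 = 1 - k := by ring
        omega
      conv_lhs => rw [hsplit]
      rw [pvInsert_split p t _ _ _ hndsplit, hval, ← hsplit]
  · have hk1 : 1 ≤ k := by omega
    rw [pvAlt_eq f k hk hpre]
    have hb0 : 0 ≤ min k (pvSurplus (f.map (fun p => p.2))) := by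
      have h1 := pvSC_nonneg (f.map (fun p => p.2)) 0
      have h2 := pvSurplus_eq (f.map (fun p => p.2))
      omega
    have hL := pvIsLevel_findL (f.map (fun p => p.2))
      (min k (pvSurplus (f.map (fun p => p.2)))) hb0
    rw [pvS_eq]
    rw [pvSurplus_eq] at hL ⊢
    exact pvMain k.toNat f k (le_refl _) hpre hk1 _ hL

theorem minimizeSum_changed : Claim_changed_minimizeSum := by
  unfold Claim_changed_minimizeSum
  refine ⟨by decide, by decide, by decide, ?_, by decide, by decide⟩
  rw [minimizeSum]
  decide

theorem minimizeSum_tight : Claim_exact_minimizeSum := by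
  intro f k _ hpre hD
  obtain ⟨hk, hMpos, hMne⟩ := hD
  have hfold1 : (f.foldl (fun (acc : Int × String) jv =>
      if acc.1 < jv.2 then (jv.2, jv.1) else acc) (0, "")).1 = maxPos f := by
    rw [pvMaxfold_fst]; rfl
  have halt : minimizeSum_alt f k = f := by
    rw [minimizeSum_alt, if_pos hk]
  have h0 : (f.foldl (fun (acc : Int × String) jv =>
      if acc.1 < jv.2 then (jv.2, jv.1) else acc) (0, "")).1 ≠ 0 := by omega
  rw [halt, pvA_neg f k h0 hk]
  obtain ⟨hall, hacc, hdisj⟩ := pvMaxfold f 0 ""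
  rcases hdisj with heq | ⟨hpos, p, t, hsplit, hpre'⟩
  · exact absurd (by rw [heq]) h0
  set M := (f.foldl (fun (acc : Int × String) jv =>
      if acc.1 < jv.2 then (jv.2, jv.1) else acc) (0, "")).1 with hMdef
  set ch := (f.foldl (fun (acc : Int × String) jv =>
      if acc.1 < jv.2 then (jv.2, jv.1) else acc) (0, "")).2 with hchdef
  have hndsplit : ((p ++ (ch, M) :: t).map Prod.fst).Nodup := by
    rw [← hsplit]; exact hpre
  have hins : ((PySem.Dict.mk f).insert ch ((k - 1) * -1)).items
      = p ++ (ch, (k - 1) * -1) :: t := by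
    conv_lhs => rw [hsplit]
    exact pvInsert_split p t _ _ _ hndsplit
  rw [hins]
  conv_rhs => rw [hsplit]
  intro heq'
  have hmid := List.append_cancel_left heq'
  simp only [List.cons.injEq, Prod.mk.injEq] at hmid
  have hv : (k - 1) * -1 = M := hmid.1.2
  have : (k - 1) * -1 = 1 - k := by ring
  omega
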